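-- pv_equiv track=rewrite | github.com/m00nlight/hackerrank | algorithm/contests/Ad-Infinitum-13/F.py | solve_naive
-- ===== SOURCE A (Python) =====
-- mmod = 1234567891
--
-- def mod(a, b):
--     """
--     Type :: (Int, Int) -> Int
--     Return modulo of a over b, make sure to return an positive number
--     when b is great than zero
--     """
--     return (a % b + b) % b
--
-- def gcd(a, b):
--     """
--     Type :: (Int, Int) -> Int
--     Return :: Greatest Common divisor
--     """
--     while b is not 0:
--         a, b = b, a % b
--     return a
--
-- def solve_naive(xs, bs):
--     ret = 0
--     for i in range(len(xs)):
--         for j in range(i + 1, len(xs)):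
--             g = gcd(xs[i], xs[j])
--             for k in range(len(bs)):
--                 ret = ret + pow(g, k, mmod) * bs[k]
--                 ret = mod(ret, mmod)
--     return ret
-- ===== SOURCE B (Python) =====
-- mmod = 1234567891
--
-- def gcd(a, b):
--     while b:
--         a, b = b, a % b
--     return a
--
-- def solve_naive(xs, bs):
--     # Count how many pairs share each gcd, then evaluate the polynomial once
--     # per distinct gcd with a modular Horner scheme.
--     from collections import Counter
--     cnt = Counter()
--     n = len(xs)
--     for i in range(n):
--         for j in range(i + 1, n):
--             cnt[gcd(xs[i], xs[j])] += 1
--     ret = 0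
--     for g, c in cnt.items():
--         t = g % mmod
--         acc = 0
--         for coef in reversed(bs):
--             acc = (acc * t + coef) % mmod
--         ret = (ret + c * acc) % mmod
--     return ret
-- ===== Notes on version B (the rewrite author's own statement) =====
-- stated objective: faster
-- what changed: B counts the pairs per distinct gcd with a Counter and evaluates the polynomial once per distinct gcd by modular Horner, instead of A's per-pair per-coefficient pow(g,k,mmod) calls.
import Mathlib
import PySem

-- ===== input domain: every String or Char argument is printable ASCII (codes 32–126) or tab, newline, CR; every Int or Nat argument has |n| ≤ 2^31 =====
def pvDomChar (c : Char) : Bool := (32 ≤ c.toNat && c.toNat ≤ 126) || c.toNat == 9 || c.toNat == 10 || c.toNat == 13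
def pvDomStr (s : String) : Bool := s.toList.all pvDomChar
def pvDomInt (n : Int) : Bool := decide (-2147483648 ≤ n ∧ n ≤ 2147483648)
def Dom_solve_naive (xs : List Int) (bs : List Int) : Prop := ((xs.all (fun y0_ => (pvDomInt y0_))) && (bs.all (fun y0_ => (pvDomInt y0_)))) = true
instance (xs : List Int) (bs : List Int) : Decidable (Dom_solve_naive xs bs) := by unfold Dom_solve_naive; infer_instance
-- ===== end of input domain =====

-- B groups the pairs by their gcd (a counter built in one pass over the pairs) and evaluates the
-- polynomial once per distinct gcd by modular Horner instead of A's per-pair per-coefficient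
-- pow(g, k, mmod) calls.

def mmod : Int := 1234567891

-- shared helper: both Pythons hand-write the same Euclid loop `while b: a, b = b, a % b`
-- (Python's % is divisor-signed: PySem.Int.mod)
-- termination fact for the loop (cited by pygcd's decreasing_by)
theorem natAbs_pymod_lt (a b : Int) (hb : b ≠ 0) :
    (PySem.Int.mod a b).natAbs < b.natAbs := by
  rcases lt_or_gt_of_ne hb with h | h
  · have := PySem.Int.mod_neg_bounds a h
    omega
  · have h1 := PySem.Int.mod_nonneg a h
    have h2 := PySem.Int.mod_lt a h
    omega

def pygcd (a b : Int) : Int :=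
  if hb : b = 0 then a else pygcd b (PySem.Int.mod a b)
termination_by b.natAbs
decreasing_by exact natAbs_pymod_lt a b hb

-- ===== PORT A =====
-- A's helper mod(a, b) = (a % b + b) % b  (Python's %, divisor-signed)
def pymod2 (a b : Int) : Int := PySem.Int.mod (PySem.Int.mod a b + b) b

def solve_naive (xs : List Int) (bs : List Int) : Int :=
  (PySem.List.pyRange 0 (xs.length : Int) 1).foldl (fun ret i =>
    (PySem.List.pyRange (i + 1) (xs.length : Int) 1).foldl (fun ret j =>
      let g := pygcd (PySem.List.pyGetD xs i 0) (PySem.List.pyGetD xs j 0)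
      (PySem.List.pyRange 0 (bs.length : Int) 1).foldl (fun ret k =>
        pymod2 (ret + PySem.Int.powMod g k.toNat mmod * PySem.List.pyGetD bs k 0) mmod) ret)
      ret) 0

-- ===== PORT B =====
def solve_naive_alt (xs : List Int) (bs : List Int) : Int :=
  let n : Int := (xs.length : Int)
  let cnt : PySem.Dict Int Int :=
    (PySem.List.pyRange 0 n 1).foldl (fun d i =>
      (PySem.List.pyRange (i + 1) n 1).foldl (fun d j =>
        let g := pygcd (PySem.List.pyGetD xs i 0) (PySem.List.pyGetD xs j 0)
        d.modify g 0 (· + 1)) d) PySem.Dict.empty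
  cnt.items.foldl (fun ret gc =>
    let t := PySem.Int.mod gc.1 mmod
    let acc := bs.reverse.foldl (fun acc coef => PySem.Int.mod (acc * t + coef) mmod) 0
    PySem.Int.mod (ret + gc.2 * acc) mmod) 0

-- ===== PRECONDITION & SPEC =====
def Spec_solve_naive (xs : List Int) (bs : List Int) (out : Int) : Prop := out = solve_naive_alt xs bs
instance (xs : List Int) (bs : List Int) (out : Int) : Decidable (Spec_solve_naive xs bs out) := by unfold Spec_solve_naive; infer_instance

-- ===== CLAIM (what is proved, stated in full; the proofs are below) =====
def Claim_equal_solve_naive : Prop := ∀ (xs : List Int) (bs : List Int), Dom_solve_naive xs bs → Spec_solve_naive xs bs (solve_naive xs bs)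

-- ===== LEMMAS AND PROOFS =====

-- the list of pair gcds, in A's/B's common iteration order
def pairGcds (xs : List Int) : List Int :=
  (PySem.List.pyRange 0 (xs.length : Int) 1).flatMap (fun i =>
    (PySem.List.pyRange (i + 1) (xs.length : Int) 1).map (fun j =>
      pygcd (PySem.List.pyGetD xs i 0) (PySem.List.pyGetD xs j 0)))

-- the polynomial Σ_k t^k * bs[k], structurally
def polyP (t : Int) (bs : List Int) : Int := bs.foldr (fun b acc => b + t * acc) 0

-- A's per-pair contribution for gcd g
def sumA (bs : List Int) (g : Int) : Int :=
  ((PySem.List.pyRange 0 (bs.length : Int) 1).map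
    (fun k => PySem.Int.powMod g k.toNat mmod * PySem.List.pyGetD bs k 0)).sum

-- B's per-gcd Horner accumulator
def accB (bs : List Int) (g : Int) : Int :=
  bs.reverse.foldl (fun acc coef => PySem.Int.mod (acc * PySem.Int.mod g mmod + coef) mmod) 0

theorem mmod_pos : (0 : Int) < mmod := by decide

theorem pymod2_eq (a : Int) : pymod2 a mmod = a % mmod := by
  unfold pymod2
  rw [PySem.Int.mod_eq_emod_of_pos mmod_pos, PySem.Int.mod_eq_emod_of_pos mmod_pos]
  simp

-- generic: a fold whose step reduces (c % mmod) to (c + f x) % mmod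
theorem foldl_modstep {α : Type} (step : Int → α → Int) (f : α → Int)
    (h : ∀ (c : Int) (x : α), step (c % mmod) x = (c + f x) % mmod) :
    ∀ (l : List α) (c : Int), l.foldl step (c % mmod) = (c + (l.map f).sum) % mmod := by
  intro l
  induction l with
  | nil => intro c; simp
  | cons x l ih =>
    intro c
    simp only [List.foldl_cons, List.map_cons, List.sum_cons, h c x, ih (c + f x)]
    ring_nf

-- A's innermost (coefficient) loop
theorem inner_k (bs : List Int) (g : Int) (c : Int) :
    (PySem.List.pyRange 0 (bs.length : Int) 1).foldl (fun ret k =>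
        pymod2 (ret + PySem.Int.powMod g k.toNat mmod * PySem.List.pyGetD bs k 0) mmod)
      (c % mmod) = (c + sumA bs g) % mmod := by
  exact foldl_modstep _ _ (fun c k => by rw [pymod2_eq, Int.emod_add_emod]) _ c

-- A's middle (j) loop
theorem inner_j (xs bs : List Int) (i : Int) (c : Int) :
    (PySem.List.pyRange (i + 1) (xs.length : Int) 1).foldl (fun ret j =>
      let g := pygcd (PySem.List.pyGetD xs i 0) (PySem.List.pyGetD xs j 0)
      (PySem.List.pyRange 0 (bs.length : Int) 1).foldl (fun ret k =>
        pymod2 (ret + PySem.Int.powMod g k.toNat mmod * PySem.List.pyGetD bs k 0) mmod) ret)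
      (c % mmod)
    = (c + ((PySem.List.pyRange (i + 1) (xs.length : Int) 1).map (fun j =>
        sumA bs (pygcd (PySem.List.pyGetD xs i 0) (PySem.List.pyGetD xs j 0)))).sum) % mmod := by
  exact foldl_modstep _ _ (fun c j => inner_k bs _ c) _ c

-- A equals the mod of the sum of per-pair contributions
theorem A_eq (xs bs : List Int) :
    solve_naive xs bs = ((pairGcds xs).map (sumA bs)).sum % mmod := by
  unfold solve_naive
  have h0 : (0 : Int) = 0 % mmod := by decide
  rw [h0, foldl_modstep _ (fun i => ((PySem.List.pyRange (i + 1) (xs.length : Int) 1).map (fun j =>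
        sumA bs (pygcd (PySem.List.pyGetD xs i 0) (PySem.List.pyGetD xs j 0)))).sum)
      (fun c i => inner_j xs bs i c)]
  rw [pairGcds, List.map_flatMap]
  rw [zero_add, List.flatMap_def, List.sum_flatten, List.map_map]
  simp [Function.comp_def, List.map_map]

-- B's dict is the counter of the pair gcds
theorem cnt_eq (xs : List Int) :
    (PySem.List.pyRange 0 (xs.length : Int) 1).foldl (fun d i =>
      (PySem.List.pyRange (i + 1) (xs.length : Int) 1).foldl (fun d j =>
        let g := pygcd (PySem.List.pyGetD xs i 0) (PySem.List.pyGetD xs j 0)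
        d.modify g 0 (· + 1)) d) PySem.Dict.empty
      = PySem.Dict.counter (pairGcds xs) := by
  rw [PySem.Dict.counter_eq_foldl, pairGcds, List.foldl_flatMap]
  simp only [List.foldl_map]

-- B equals the mod of the grouped sum
theorem B_eq (xs bs : List Int) :
    solve_naive_alt xs bs =
      ((PySem.Set.ofList (pairGcds xs)).map
        (fun g => ((pairGcds xs).count g : Int) * accB bs g)).sum % mmod := by
  unfold solve_naive_alt
  simp only [cnt_eq, PySem.Dict.items_counter]
  have h0 : (0 : Int) = 0 % mmod := by decide
  rw [h0, List.foldl_map, foldl_modstep _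
      (fun g => ((pairGcds xs).count g : Int) * accB bs g)
      (fun c g => by
        simp only []
        rw [PySem.Int.mod_eq_emod_of_pos mmod_pos, Int.emod_add_emod]
        rfl)]
  rw [zero_add]

-- Horner accumulates the polynomial mod mmod
theorem accB_eq (bs : List Int) (g : Int) :
    accB bs g = polyP (PySem.Int.mod g mmod) bs % mmod := by
  induction bs with
  | nil => rfl
  | cons b r ih =>
    unfold accB at ih ⊢
    rw [List.reverse_cons, List.foldl_append, ih, List.foldl_cons, List.foldl_nil,
      PySem.Int.mod_eq_emod_of_pos mmod_pos]
    have : polyP (PySem.Int.mod g mmod) r % mmod * PySem.Int.mod g mmod + b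
        ≡ polyP (PySem.Int.mod g mmod) r * PySem.Int.mod g mmod + b [ZMOD mmod] :=
      Int.ModEq.add_right b (Int.ModEq.mul_right _ (Int.emod_emod _ _))
    rw [this]
    have h2 : polyP (PySem.Int.mod g mmod) r * PySem.Int.mod g mmod + b
        = polyP (PySem.Int.mod g mmod) (b :: r) := by
      simp only [polyP, List.foldr_cons]; ring
    rw [h2]

-- termwise ModEq sum congruence
theorem sum_map_modeq {α : Type} (l : List α) (f h : α → Int)
    (H : ∀ x ∈ l, f x ≡ h x [ZMOD mmod]) :
    (l.map f).sum ≡ (l.map h).sum [ZMOD mmod] := by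
  induction l with
  | nil => rfl
  | cons x l ih =>
    simp only [List.map_cons, List.sum_cons]
    exact (H x (by simp)).add (ih (fun y hy => H y (by simp [hy])))

-- the index-wise sum of t^k * bs[k] is the structural polynomial
theorem polyN_eq (t : Int) (bs : List Int) :
    ((List.range bs.length).map (fun k => t ^ k * bs.getD k 0)).sum = polyP t bs := by
  induction bs with
  | nil => rfl
  | cons b r ih =>
    simp only [List.length_cons, List.range_succ_eq_map, List.map_cons, List.map_map,
      List.sum_cons, pow_zero, one_mul, List.getD_cons_zero]
    have : (List.map ((fun k => t ^ k * (b :: r).getD k 0) ∘ Nat.succ) (List.range r.length)).sum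
        = (List.map (fun k => t * (t ^ k * r.getD k 0)) (List.range r.length)).sum := by
      congr 1
      apply List.map_congr_left
      intro k _
      simp [Function.comp, pow_succ]
      ring
    rw [this, PySem.List.sum_map_const_mul_int, ih]
    simp [polyP]

-- A's per-pair contribution is congruent to the polynomial at g % mmod
theorem sumA_modeq (bs : List Int) (g : Int) :
    sumA bs g ≡ polyP (PySem.Int.mod g mmod) bs [ZMOD mmod] := by
  unfold sumA
  rw [PySem.List.pyRange_zero_natCast, List.map_map]
  have step1 : ∀ k ∈ List.range bs.length,
      ((fun k : Int => PySem.Int.powMod g k.toNat mmod * PySem.List.pyGetD bs k 0) ∘ (fun k : Nat => (k : Int))) k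
        ≡ (fun k : Nat => PySem.Int.mod g mmod ^ k * bs.getD k 0) k [ZMOD mmod] := by
    intro k _
    simp only [Function.comp, PySem.Int.powMod_eq, Int.toNat_natCast, PySem.List.pyGetD_natCast,
      PySem.Int.mod_eq_emod_of_pos mmod_pos]
    have hg : g % mmod ≡ g [ZMOD mmod] := Int.emod_emod g mmod
    exact Int.ModEq.mul_right _ ((Int.emod_emod (g ^ k) mmod).trans (hg.pow k).symm)
  calc ((List.range bs.length).map _).sum
      ≡ ((List.range bs.length).map (fun k : Nat => PySem.Int.mod g mmod ^ k * bs.getD k 0)).sum [ZMOD mmod] :=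
        sum_map_modeq _ _ _ step1
    _ = polyP (PySem.Int.mod g mmod) bs := polyN_eq _ bs

-- grouping a sum by distinct values with multiplicities
theorem sum_group (L : List Int) (F : Int → Int) :
    (L.map F).sum = ((PySem.Set.ofList L).map (fun g => (L.count g : Int) * F g)).sum := by
  rw [Finset.sum_list_map_count]
  rw [← List.sum_toFinset _ (PySem.Set.nodup_ofList L)]
  have : (PySem.Set.ofList L : List Int).toFinset = L.toFinset := by
    apply Finset.ext; intro x
    simp [List.mem_toFinset, PySem.Set.mem_ofList]
  rw [this]
  apply Finset.sum_congr rfl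
  intro x _
  simp

-- ===== VERDICT (by name: the statement is the Claim_ definition above) =====
theorem solve_naive_spec : Claim_equal_solve_naive := by
  intro xs bs _
  unfold Spec_solve_naive
  rw [A_eq, B_eq, sum_group (pairGcds xs) (sumA bs)]
  have H : ((PySem.Set.ofList (pairGcds xs)).map
      (fun g => ((pairGcds xs).count g : Int) * sumA bs g)).sum ≡
      ((PySem.Set.ofList (pairGcds xs)).map
      (fun g => ((pairGcds xs).count g : Int) * accB bs g)).sum [ZMOD mmod] := by
    apply sum_map_modeq
    intro g _
    apply Int.ModEq.mul_left
    calc sumA bs g ≡ polyP (PySem.Int.mod g mmod) bs [ZMOD mmod] := sumA_modeq bs g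
      _ ≡ accB bs g [ZMOD mmod] := by rw [accB_eq]; exact (Int.emod_emod _ _).symm
  exact H
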